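-- pv_equiv track=rewrite | github.com/manas-17045/LeetcodeSolutions | Leetcode 2901-3000/2931/2931_1.py | maxSpending
-- ===== SOURCE A (Python) =====
-- import heapq
--
-- def maxSpending(values: list[list[int]]) -> int:
--     """
--     Calculates the maximum spending possible by buying items from different shops.
--
--     The strategy is to always buy the cheapest available item on the current day,
--     as this maximizes the spending due to the increasing multiplier (day number).
--     A min-heap is used to efficiently retrieve the cheapest item across all shops.
--
--     Args:
--         values: A list of lists of integers, where values[i][j] represents the
--                 price of the j-th item in the i-th shop. Items in each shop
--                 are sorted in ascending order of price.
--
--     Returns: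
--         The maximum total spending.
--     """
--     numShops = len(values)
--     numItems = len(values[0])
--
--     minHeap = []
--     for i in range(numShops):
--         itemValue = values[i][numItems - 1]
--         shopIndex = i
--         itemIndex = numItems - 1
--         heapq.heappush(minHeap, (itemValue, shopIndex, itemIndex))
--
--     totalSpending = 0
--     day = 1
--
--     while minHeap:
--         itemValue, shopIndex, itemIndex = heapq.heappop(minHeap)
--
--         totalSpending += itemValue * day
--         day += 1
--
--         if itemIndex > 0:
--             nextItemIndex = itemIndex - 1
--             nextItemValue = values[shopIndex][nextItemIndex]
--             heapq.heappush(minHeap, (nextItemValue, shopIndex, nextItemIndex))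
--
--     return totalSpending
-- ===== SOURCE B (Python) =====
-- def maxSpending(values: list[list[int]]) -> int:
--     n = len(values[0])
--     merged = []
--     for shop in values:
--         merged = _merge(merged, [shop[j] for j in range(n - 1, -1, -1)])
--     total = 0
--     for day, p in enumerate(merged, 1):
--         total += p * day
--     return total
--
--
-- def _merge(a, b):
--     out = []
--     i = j = 0
--     while i < len(a) and j < len(b):
--         if a[i] <= b[j]:
--             out.append(a[i])
--             i += 1
--         else:
--             out.append(b[j])
--             j += 1
--     out += a[i:]
--     out += b[j:]
--     return out
-- ===== Notes on version B (the rewrite author's own statement) =====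
-- stated objective: alternative
-- what changed: Replaces the lazy min-heap k-way merge with per-shop index bookkeeping by folding a two-pointer binary merge over each shop's first-n prices taken back-to-front, then a single enumerate pass accumulating price*day.
import Mathlib
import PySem

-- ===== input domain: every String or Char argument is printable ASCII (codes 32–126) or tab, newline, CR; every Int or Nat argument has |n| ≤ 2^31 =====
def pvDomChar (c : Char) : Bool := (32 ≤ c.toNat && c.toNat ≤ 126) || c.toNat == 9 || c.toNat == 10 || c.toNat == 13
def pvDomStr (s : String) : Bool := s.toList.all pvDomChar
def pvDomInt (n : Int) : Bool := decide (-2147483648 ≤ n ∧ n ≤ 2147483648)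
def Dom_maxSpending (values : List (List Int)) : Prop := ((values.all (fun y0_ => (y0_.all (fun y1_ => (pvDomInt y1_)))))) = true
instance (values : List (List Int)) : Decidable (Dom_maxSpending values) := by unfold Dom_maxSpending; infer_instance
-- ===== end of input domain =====

-- B replaces the heap-based k-way merge by a fold of binary two-pointer merges plus one weighted
-- pass (alternative structure, not claimed faster). Equivalence is claimed on Pre_ (rectangular
-- input with a nonempty first row, exactly where A returns).

-- ===== PORT A =====
-- Python tuple '<=' on (int,int,int), lexicographic (exact: Python compares such tuples lexicographically).
def pvLe (a b : Int × Int × Int) : Bool :=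
  decide (a.1 < b.1 ∨ (a.1 = b.1 ∧ (a.2.1 < b.2.1 ∨ (a.2.1 = b.2.1 ∧ a.2.2 ≤ b.2.2))))

-- heapq is modelled by its multiset semantics: heappush = append, heappop = extract the minimum
-- (leftmost minimal tuple). Exact here: the heap always holds tuples with pairwise-distinct shop
-- indices, so the minimum popped by heapq is unique and independent of the heap's internal layout.
def pvPopMin : List (Int × Int × Int) → Option ((Int × Int × Int) × List (Int × Int × Int))
  | [] => none
  | x :: xs =>
    match pvPopMin xs with
    | none => some (x, [])
    | some (m, rest) => if pvLe x m then some (x, xs) else some (m, x :: rest)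

-- values[s][i] with a default; under Pre_ all accesses are in range, so the default is never used.
def pvGetV (values : List (List Int)) (s i : Int) : Int :=
  PySem.List.pyGetD (PySem.List.pyGetD values s []) i 0

-- the initial heap: for i in range(numShops): heappush((values[i][numItems-1], i, numItems-1))
def pvHeapInit (values : List (List Int)) (numItems : Int) : List (Int × Int × Int) :=
  (PySem.List.pyRange 0 values.length 1).foldl
    (fun h i => h ++ [(pvGetV values i (numItems - 1), i, numItems - 1)]) []

-- the while loop; fuel is only a totality guard (one unit per item ever pushed), never reached 0 first
def pvLoop (values : List (List Int)) : Nat → List (Int × Int × Int) → Int → Int → Int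
  | 0, _, total, _ => total
  | fuel + 1, h, total, day =>
    match pvPopMin h with
    | none => total
    | some ((v, s, i), rest) =>
      if 0 < i then
        pvLoop values fuel (rest ++ [(pvGetV values s (i - 1), s, i - 1)]) (total + v * day) (day + 1)
      else
        pvLoop values fuel rest (total + v * day) (day + 1)

def maxSpending (values : List (List Int)) : Int :=
  let numItems : Int := ((PySem.List.pyGet? values 0).getD []).length  -- len(values[0]); raises outside Pre_
  let minHeap := pvHeapInit values numItems
  pvLoop values ((minHeap.map (fun e => e.2.2.toNat + 1)).sum) minHeap 0 1

-- ===== PORT B =====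
-- two-pointer merge of Source B's _merge: out collects the smaller head (left preferred on ties);
-- the suffixes a[i:], b[j:] of the Python loop are the two list arguments here
def pvMerge : List Int → List Int → List Int
  | [], b => b
  | a, [] => a
  | x :: xs, y :: ys => if x ≤ y then x :: pvMerge xs (y :: ys) else y :: pvMerge (x :: xs) ys
  termination_by a b => a.length + b.length

def maxSpending_alt (values : List (List Int)) : Int :=
  let n : Int := ((PySem.List.pyGet? values 0).getD []).length  -- len(values[0]); raises outside Pre_
  -- [shop[j] for j in range(n - 1, -1, -1)]; in-range under Pre_, so the default is never used
  let merged := values.foldl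
    (fun merged shop =>
      pvMerge merged ((PySem.List.pyRange (n - 1) (-1) (-1)).map
        (fun j => PySem.List.pyGetD shop j 0))) []
  (PySem.List.enumerate merged 1).foldl (fun total dp => total + dp.2 * dp.1) 0

-- ===== PRECONDITION & SPEC =====
-- Pre_ excludes exactly the inputs on which A raises IndexError: empty values, an empty first
-- row, or a row shorter than the first row (A indexes every row at len(values[0]) - 1).
def Pre_maxSpending (values : List (List Int)) : Prop :=
  values ≠ [] ∧ (values.headD []) ≠ [] ∧
  (∀ r ∈ values, (values.headD []).length ≤ r.length)
instance (values : List (List Int)) : Decidable (Pre_maxSpending values) := by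
  unfold Pre_maxSpending; infer_instance

def pvWitness_maxSpending : List (List Int) := [[3, 1], [2, 2]]

def Spec_maxSpending (values : List (List Int)) (out : Int) : Prop := out = maxSpending_alt values
instance (values : List (List Int)) (out : Int) : Decidable (Spec_maxSpending values out) := by
  unfold Spec_maxSpending; infer_instance

-- ===== CLAIM (what is proved, stated in full; the proofs are below) =====
def Claim_equal_maxSpending : Prop := ∀ (values : List (List Int)), Dom_maxSpending values → Pre_maxSpending values → Spec_maxSpending values (maxSpending values)

-- ===== LEMMAS AND PROOFS =====

-- proof-only helpers
def pvRow (values : List (List Int)) (s : Int) : List Int := values.getD s.toNat []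

/-- The remaining price sequence of the shop of heap entry `(v, s, i)`:
`values[s][i], values[s][i-1], …, values[s][0]` — the reversed prefix of row `s` up to `i`. -/
def pvSeq (values : List (List Int)) (e : Int × Int × Int) : List Int :=
  ((pvRow values e.2.1).take (e.2.2.toNat + 1)).reverse

/-- Invariant of every heap entry `(v, s, i)`: indices in range and `v = values[s][i]`. -/
def pvInv (values : List (List Int)) (e : Int × Int × Int) : Prop :=
  0 ≤ e.2.1 ∧ e.2.1.toNat < values.length ∧ 0 ≤ e.2.2 ∧
  e.2.2.toNat < (pvRow values e.2.1).length ∧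
  e.1 = (pvRow values e.2.1).getD e.2.2.toNat 0

/-- The day-weighted sum B computes, generalized over the starting total and day. -/
def pvWsum (l : List Int) (total day : Int) : Int :=
  (PySem.List.enumerate l day).foldl (fun t dp => t + dp.2 * dp.1) total

theorem pvWsum_cons (x : Int) (xs : List Int) (t d : Int) :
    pvWsum (x :: xs) t d = pvWsum xs (t + x * d) (d + 1) := by
  simp [pvWsum, PySem.List.enumerate_cons]

theorem pvLe_fst_le {a b : Int × Int × Int} (h : pvLe a b = true) : a.1 ≤ b.1 := by
  simp [pvLe] at h; omega

theorem pvLe_total {a b : Int × Int × Int} (h : pvLe a b = false) : pvLe b a = true := by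
  simp [pvLe] at h ⊢; omega

theorem pvLe_trans {a b c : Int × Int × Int} (h1 : pvLe a b = true) (h2 : pvLe b c = true) :
    pvLe a c = true := by
  simp [pvLe] at h1 h2 ⊢; omega

theorem pvLe_refl (a : Int × Int × Int) : pvLe a a = true := by
  simp [pvLe]

/-- The popped minimum is strictly smaller in value than any entry with a smaller shop index. -/
theorem pvLe_lt_of_shop_lt {a b : Int × Int × Int} (h : pvLe a b = true) (hs : b.2.1 < a.2.1) :
    a.1 < b.1 := by
  simp [pvLe] at h; omega

theorem pvPopMin_none {h : List (Int × Int × Int)} (hp : pvPopMin h = none) : h = [] := by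
  cases h with
  | nil => rfl
  | cons x xs =>
    exfalso
    rw [pvPopMin] at hp
    cases hx : pvPopMin xs with
    | none => rw [hx] at hp; simp at hp
    | some p =>
      obtain ⟨m, rest⟩ := p
      rw [hx] at hp; dsimp at hp
      by_cases hle : pvLe x m <;> simp [hle] at hp

theorem pvPopMin_perm (h : List (Int × Int × Int)) :
    ∀ m rest, pvPopMin h = some (m, rest) → h.Perm (m :: rest) := by
  induction h with
  | nil => intro m rest hp; simp [pvPopMin] at hp
  | cons x xs ih =>
    intro m rest hp
    rw [pvPopMin] at hp
    cases hx : pvPopMin xs with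
    | none =>
      rw [hx] at hp; simp at hp
      obtain ⟨rfl, rfl⟩ := hp
      have hxs : xs = [] := pvPopMin_none hx
      subst hxs; exact List.Perm.refl _
    | some p =>
      obtain ⟨m', rest'⟩ := p
      rw [hx] at hp; dsimp at hp
      by_cases hle : pvLe x m'
      · simp [hle] at hp
        obtain ⟨rfl, rfl⟩ := hp
        exact List.Perm.refl _
      · simp [hle] at hp
        obtain ⟨rfl, rfl⟩ := hp
        exact ((ih _ _ hx).cons x).trans (List.Perm.swap _ _ _)

/-- The popped entry is `pvLe`-below every heap element. -/
theorem pvPopMin_le (h : List (Int × Int × Int)) :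
    ∀ m rest, pvPopMin h = some (m, rest) → ∀ x ∈ h, pvLe m x = true := by
  induction h with
  | nil => intro m rest hp; simp [pvPopMin] at hp
  | cons x xs ih =>
    intro m rest hp y hy
    rw [pvPopMin] at hp
    cases hx : pvPopMin xs with
    | none =>
      rw [hx] at hp; simp at hp
      obtain ⟨rfl, rfl⟩ := hp
      have hxs : xs = [] := pvPopMin_none hx
      subst hxs
      simp at hy; subst hy; exact pvLe_refl _
    | some p =>
      obtain ⟨m', rest'⟩ := p
      rw [hx] at hp; dsimp at hp
      by_cases hle : pvLe x m'
      · simp [hle] at hp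
        obtain ⟨rfl, rfl⟩ := hp
        rcases List.mem_cons.mp hy with rfl | hy'
        · exact pvLe_refl _
        · exact pvLe_trans hle (ih _ _ hx _ hy')
      · simp [hle] at hp
        obtain ⟨rfl, rfl⟩ := hp
        rcases List.mem_cons.mp hy with rfl | hy'
        · exact pvLe_total (by simpa using hle)
        · exact ih _ _ hx _ hy'

theorem pvGetV_eq (values : List (List Int)) (s i : Int) (hs0 : 0 ≤ s)
    (hs : s.toNat < values.length) (hi0 : 0 ≤ i) (hi : i.toNat < (pvRow values s).length) :
    pvGetV values s i = (pvRow values s).getD i.toNat 0 := by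
  have hrow : pvRow values s = values[s.toNat] := List.getD_eq_getElem values [] hs
  unfold pvGetV
  rw [PySem.List.pyGetD_eq_getElem values [] hs0 (by omega)]
  rw [hrow] at hi ⊢
  rw [PySem.List.pyGetD_eq_getElem _ 0 hi0 (by omega)]
  rw [List.getD_eq_getElem _ _ hi]

/-- One equation of `pvLoop` at positive fuel. -/
theorem pvLoop_succ (values : List (List Int)) (fuel : Nat) (h : List (Int × Int × Int))
    (total day : Int) :
    pvLoop values (fuel + 1) h total day =
      match pvPopMin h with
      | none => total
      | some ((v, s, i), rest) =>
        if 0 < i then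
          pvLoop values fuel (rest ++ [(pvGetV values s (i - 1), s, i - 1)]) (total + v * day) (day + 1)
        else pvLoop values fuel rest (total + v * day) (day + 1) := rfl

-- merge equations and basic facts
theorem pvMerge_nil_left (b : List Int) : pvMerge [] b = b := by
  cases b <;> simp [pvMerge]

theorem pvMerge_nil_right (a : List Int) : pvMerge a [] = a := by
  cases a <;> simp [pvMerge]

theorem pvMerge_left {x y : Int} (h : x ≤ y) (xs ys : List Int) :
    pvMerge (x :: xs) (y :: ys) = x :: pvMerge xs (y :: ys) := by
  rw [pvMerge]; exact if_pos h

theorem pvMerge_right {x y : Int} (h : ¬ x ≤ y) (xs ys : List Int) :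
    pvMerge (x :: xs) (y :: ys) = y :: pvMerge (x :: xs) ys := by
  rw [pvMerge]; exact if_neg h

theorem pvMerge_cons_cons (x y : Int) (xs ys : List Int) :
    pvMerge (x :: xs) (y :: ys)
      = if x ≤ y then x :: pvMerge xs (y :: ys) else y :: pvMerge (x :: xs) ys := by
  rw [pvMerge]

theorem pvMerge_ne_nil {a : List Int} (ha : a ≠ []) (b : List Int) : pvMerge a b ≠ [] := by
  cases a with
  | nil => exact absurd rfl ha
  | cons x xs =>
    cases b with
    | nil => simp [pvMerge_nil_right]
    | cons y ys => rw [pvMerge_cons_cons]; split <;> simp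

/-- A fold of merges over nonempty sequences is empty iff there are no sequences. -/
theorem pvFoldr_eq_nil {P : List (List Int)} (hne : ∀ r ∈ P, r ≠ []) :
    List.foldr pvMerge [] P = [] ↔ P = [] := by
  cases P with
  | nil => simp
  | cons r P' =>
    simp only [List.foldr_cons]
    constructor
    · intro hc
      exact absurd hc (pvMerge_ne_nil (hne r (List.mem_cons_self)) _)
    · intro hc; exact absurd hc (by simp)

/-- If every sequence's head is ≥ v, the head of the merged fold is ≥ v. -/
theorem pvFoldr_head_ge (v : Int) (P : List (List Int)) (hne : ∀ r ∈ P, r ≠ [])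
    (hge : ∀ r ∈ P, ∀ hd, r.head? = some hd → v ≤ hd) :
    ∀ w M', List.foldr pvMerge [] P = w :: M' → v ≤ w := by
  induction P with
  | nil => intro w M' hF; simp at hF
  | cons r P' ih =>
    intro w M' hF
    have hr : r ≠ [] := hne r (List.mem_cons_self)
    obtain ⟨x, xs, rfl⟩ : ∃ x xs, r = x :: xs := by
      cases r with
      | nil => exact absurd rfl hr
      | cons x xs => exact ⟨x, xs, rfl⟩
    have hvx : v ≤ x := hge _ (List.mem_cons_self) x rfl
    rw [List.foldr_cons] at hF
    cases hG : List.foldr pvMerge [] P' with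
    | nil =>
      rw [hG, pvMerge_nil_right] at hF
      cases hF
      exact hvx
    | cons w' M'' =>
      have hvw' : v ≤ w' := ih (fun r hr => hne r (List.mem_cons_of_mem _ hr))
        (fun r hr => hge r (List.mem_cons_of_mem _ hr)) w' M'' hG
      rw [hG, pvMerge_cons_cons] at hF
      split at hF <;> (cases hF; omega)

/-- KEY LEMMA: popping the global minimum from a fold of merges. If the distinguished
sequence `v :: t` has the strictly smallest head among the earlier sequences `A` and a
head ≤ every head in the later sequences `B`, the merged fold starts with `v` and
continues as the fold with `v :: t` replaced by `t` (dropped when empty). -/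
theorem pvMergeFold_pop (A : List (List Int)) (v : Int) (t : List Int) (B : List (List Int))
    (hA : ∀ r ∈ A, r ≠ []) (hB : ∀ r ∈ B, r ≠ [])
    (hAgt : ∀ r ∈ A, ∀ hd, r.head? = some hd → v < hd)
    (hBge : ∀ r ∈ B, ∀ hd, r.head? = some hd → v ≤ hd) :
    List.foldr pvMerge [] (A ++ (v :: t) :: B)
      = v :: List.foldr pvMerge [] (A ++ (if t = [] then [] else [t]) ++ B) := by
  induction A with
  | nil =>
    simp only [List.nil_append, List.foldr_cons]
    cases hF : List.foldr pvMerge [] B with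
    | nil =>
      have hBnil : B = [] := (pvFoldr_eq_nil hB).mp hF
      subst hBnil
      cases t with
      | nil => simp [pvMerge_nil_right]
      | cons a t' => simp [pvMerge_nil_right]
    | cons w M' =>
      have hvw : v ≤ w := pvFoldr_head_ge v B hB hBge w M' hF
      rw [pvMerge_cons_cons, if_pos hvw]
      cases t with
      | nil => simp [pvMerge_nil_left, hF]
      | cons a t' => simp [hF]
  | cons r A' ih =>
    have hr : r ≠ [] := hA r (List.mem_cons_self)
    obtain ⟨x, xs, rfl⟩ : ∃ x xs, r = x :: xs := by
      cases r with
      | nil => exact absurd rfl hr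
      | cons x xs => exact ⟨x, xs, rfl⟩
    have hvx : v < x := hAgt _ (List.mem_cons_self) x rfl
    simp only [List.cons_append, List.foldr_cons]
    rw [ih (fun r hr => hA r (List.mem_cons_of_mem _ hr))
      (fun r hr => hAgt r (List.mem_cons_of_mem _ hr))]
    rw [pvMerge_cons_cons, if_neg (by omega)]

theorem pvMerge_assoc_aux :
    ∀ (n : Nat) (a b c : List Int), a.length + b.length + c.length ≤ n →
      pvMerge (pvMerge a b) c = pvMerge a (pvMerge b c) := by
  intro n
  induction n with
  | zero =>
    intro a b c hn
    have : a = [] := by cases a <;> simp_all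
    subst this
    simp [pvMerge_nil_left]
  | succ n ih =>
    intro a b c hn
    cases a with
    | nil => simp [pvMerge_nil_left]
    | cons x xs =>
    cases b with
    | nil => simp [pvMerge_nil_left, pvMerge_nil_right]
    | cons y ys =>
    cases c with
    | nil => simp [pvMerge_nil_right]
    | cons z zs =>
    by_cases hxy : x ≤ y
    · by_cases hxz : x ≤ z
      · rw [pvMerge_left hxy xs ys]
        rw [pvMerge_left hxz (pvMerge xs (y :: ys)) zs]
        by_cases hyz : y ≤ z
        · rw [pvMerge_left hyz ys zs]
          rw [pvMerge_left hxy xs (pvMerge ys (z :: zs))]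
          rw [← pvMerge_left hyz ys zs]
          exact congrArg _ (ih xs (y :: ys) (z :: zs) (by simp at hn ⊢; omega))
        · rw [pvMerge_right hyz ys zs]
          rw [pvMerge_left hxz xs (pvMerge (y :: ys) zs)]
          rw [← pvMerge_right hyz ys zs]
          exact congrArg _ (ih xs (y :: ys) (z :: zs) (by simp at hn ⊢; omega))
      · -- z < x ≤ y
        have hyz : ¬ y ≤ z := by omega
        rw [pvMerge_left hxy xs ys]
        rw [pvMerge_right hxz (pvMerge xs (y :: ys)) zs]
        rw [← pvMerge_left hxy xs ys]
        rw [pvMerge_right hyz ys zs]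
        rw [pvMerge_right hxz xs (pvMerge (y :: ys) zs)]
        exact congrArg _ (ih (x :: xs) (y :: ys) zs (by simp at hn ⊢; omega))
    · by_cases hyz : y ≤ z
      · -- y < x, y ≤ z
        rw [pvMerge_right hxy xs ys]
        rw [pvMerge_left hyz (pvMerge (x :: xs) ys) zs]
        rw [pvMerge_left hyz ys zs]
        rw [pvMerge_right hxy xs (pvMerge ys (z :: zs))]
        exact congrArg _ (ih (x :: xs) ys (z :: zs) (by simp at hn ⊢; omega))
      · -- z < y < x
        have hxz : ¬ x ≤ z := by omega
        rw [pvMerge_right hxy xs ys]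
        rw [pvMerge_right hyz (pvMerge (x :: xs) ys) zs]
        rw [← pvMerge_right hxy xs ys]
        rw [pvMerge_right hyz ys zs]
        rw [pvMerge_right hxz xs (pvMerge (y :: ys) zs)]
        exact congrArg _ (ih (x :: xs) (y :: ys) zs (by simp at hn ⊢; omega))

theorem pvMerge_assoc (a b c : List Int) :
    pvMerge (pvMerge a b) c = pvMerge a (pvMerge b c) :=
  pvMerge_assoc_aux (a.length + b.length + c.length) a b c le_rfl

-- facts about pvSeq under the invariant
theorem pvSeq_decomp {values : List (List Int)} {e : Int × Int × Int}
    (hinv : pvInv values e) :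
    pvSeq values e = e.1 :: ((pvRow values e.2.1).take e.2.2.toNat).reverse := by
  obtain ⟨_, _, _, hilen, hveq⟩ := hinv
  unfold pvSeq
  rw [List.take_add_one, List.getElem?_eq_getElem hilen]
  rw [List.getD_eq_getElem _ _ hilen] at hveq
  rw [← hveq]
  simp

theorem pvSeq_ne_nil {values : List (List Int)} {e : Int × Int × Int}
    (hinv : pvInv values e) : pvSeq values e ≠ [] := by
  rw [pvSeq_decomp hinv]; simp

theorem pvSeq_head {values : List (List Int)} {e : Int × Int × Int}
    (hinv : pvInv values e) : (pvSeq values e).head? = some e.1 := by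
  rw [pvSeq_decomp hinv]; rfl

/-- MAIN INVARIANT: if the heap `h` is a permutation of entries `es` listed in strictly
increasing shop order, all satisfying `pvInv`, then A's loop computes the day-weighted sum
of the fold of binary merges of the entries' remaining sequences. -/
theorem pvLoop_merge (values : List (List Int)) :
    ∀ (fuel : Nat) (h es : List (Int × Int × Int)) (total day : Int),
      h.Perm es →
      (es.map (fun e => e.2.1)).Pairwise (· < ·) →
      (∀ e ∈ es, pvInv values e) →
      ((es.map (fun e => pvSeq values e)).map List.length).sum ≤ fuel →
      pvLoop values fuel h total day
        = pvWsum (List.foldr pvMerge [] (es.map (fun e => pvSeq values e))) total day := by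
  intro fuel
  induction fuel with
  | zero =>
    intro h es total day hperm hpair hinv hf
    cases es with
    | nil =>
      have hh : h = [] := hperm.eq_nil
      subst hh
      rfl
    | cons e es' =>
      exfalso
      have h1 : pvSeq values e ≠ [] := pvSeq_ne_nil (hinv e (List.mem_cons_self))
      have h2 : 0 < (pvSeq values e).length := List.length_pos_iff.mpr h1
      simp only [List.map_cons, List.sum_cons] at hf
      omega
  | succ fuel ih =>
    intro h es total day hperm hpair hinv hf
    rw [pvLoop_succ]
    cases hpop : pvPopMin h with
    | none =>
      have hh : h = [] := pvPopMin_none hpop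
      subst hh
      have hes : es = [] := hperm.symm.eq_nil
      subst hes
      rfl
    | some pr =>
      obtain ⟨⟨v, s, i⟩, rest⟩ := pr
      dsimp only
      have hperm' : h.Perm ((v, s, i) :: rest) := pvPopMin_perm h _ _ hpop
      have hle : ∀ x ∈ h, pvLe (v, s, i) x = true := pvPopMin_le h _ _ hpop
      have hmemes : (v, s, i) ∈ es := hperm.mem_iff.mp (hperm'.mem_iff.mpr List.mem_cons_self)
      obtain ⟨es1, es2, hsplit⟩ := List.append_of_mem hmemes
      subst hsplit
      obtain ⟨hs0, hslen, hi0, hilen, hveq⟩ := hinv _ hmemes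
      dsimp only at hs0 hslen hi0 hilen hveq
      -- shop-order facts
      have hpair' := hpair
      rw [List.map_append, List.map_cons, List.pairwise_append] at hpair'
      obtain ⟨hp1, hp2, hcross⟩ := hpair'
      have hA_shop : ∀ e ∈ es1, e.2.1 < s := by
        intro e he
        exact hcross _ (List.mem_map_of_mem he) _ List.mem_cons_self
      have hB_shop : ∀ e ∈ es2, s < e.2.1 := by
        intro e he
        exact (List.pairwise_cons.mp hp2).1 _ (List.mem_map_of_mem he)
      -- every entry of es is in h
      have hmemh : ∀ e ∈ es1 ++ (v, s, i) :: es2, e ∈ h := fun e he => hperm.mem_iff.mpr he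
      -- decompose the sequence of the popped entry
      have hseq : pvSeq values (v, s, i) = v :: ((pvRow values s).take i.toNat).reverse :=
        pvSeq_decomp ⟨hs0, hslen, hi0, hilen, hveq⟩
      set t : List Int := ((pvRow values s).take i.toNat).reverse with ht
      -- K-lemma hypotheses
      have hKA : ∀ r ∈ es1.map (fun e => pvSeq values e), r ≠ [] := by
        intro r hr
        obtain ⟨e, he, rfl⟩ := List.mem_map.mp hr
        exact pvSeq_ne_nil (hinv e (List.mem_append_left _ he))
      have hKB : ∀ r ∈ es2.map (fun e => pvSeq values e), r ≠ [] := by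
        intro r hr
        obtain ⟨e, he, rfl⟩ := List.mem_map.mp hr
        exact pvSeq_ne_nil (hinv e (List.mem_append_right _ (List.mem_cons_of_mem _ he)))
      have hKAgt : ∀ r ∈ es1.map (fun e => pvSeq values e), ∀ hd, r.head? = some hd → v < hd := by
        intro r hr hd hhd
        obtain ⟨e, he, rfl⟩ := List.mem_map.mp hr
        rw [pvSeq_head (hinv e (List.mem_append_left _ he))] at hhd
        cases hhd
        exact pvLe_lt_of_shop_lt (hle e (hmemh e (List.mem_append_left _ he))) (hA_shop e he)
      have hKBge : ∀ r ∈ es2.map (fun e => pvSeq values e), ∀ hd, r.head? = some hd → v ≤ hd := by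
        intro r hr hd hhd
        obtain ⟨e, he, rfl⟩ := List.mem_map.mp hr
        rw [pvSeq_head (hinv e (List.mem_append_right _ (List.mem_cons_of_mem _ he)))] at hhd
        cases hhd
        exact pvLe_fst_le (hle e (hmemh e (List.mem_append_right _ (List.mem_cons_of_mem _ he))))
      -- apply the key lemma
      have hK : List.foldr pvMerge [] ((es1 ++ (v, s, i) :: es2).map (fun e => pvSeq values e))
          = v :: List.foldr pvMerge []
              (es1.map (fun e => pvSeq values e) ++ (if t = [] then [] else [t])
                ++ es2.map (fun e => pvSeq values e)) := by
        rw [List.map_append, List.map_cons, hseq]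
        exact pvMergeFold_pop _ v t _ hKA hKB hKAgt hKBge
      rw [hK, pvWsum_cons]
      -- the rest of the heap is a permutation of the other entries
      have hrest : rest.Perm (es1 ++ es2) := by
        have h1 : ((v, s, i) :: rest).Perm ((v, s, i) :: (es1 ++ es2)) :=
          hperm'.symm.trans (hperm.trans List.perm_middle)
        exact h1.cons_inv
      by_cases hipos : 0 < i
      · rw [if_pos hipos]
        set e' : Int × Int × Int := (pvGetV values s (i - 1), s, i - 1) with he'
        have hinv' : pvInv values e' := by
          refine ⟨hs0, hslen, ?_, ?_, ?_⟩
          · show (0 : Int) ≤ i - 1; omega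
          · show (i - 1).toNat < (pvRow values s).length; omega
          · show pvGetV values s (i - 1) = (pvRow values s).getD (i - 1).toNat 0
            exact pvGetV_eq values s (i - 1) hs0 hslen (by omega) (by omega)
        have hseq' : pvSeq values e' = t := by
          unfold pvSeq
          rw [ht]
          have : ((i : Int) - 1).toNat + 1 = i.toNat := by omega
          rw [he']
          dsimp only
          rw [this]
        have htne : t ≠ [] := by
          rw [← hseq']
          exact pvSeq_ne_nil hinv'
        -- new heap is a permutation of the updated entry list
        have hperm2 : (rest ++ [e']).Perm (es1 ++ e' :: es2) := by
          have h1 : (rest ++ [e']).Perm ((es1 ++ es2) ++ [e']) := hrest.append_right _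
          have h3 : (es2 ++ [e']).Perm (e' :: es2) := List.perm_append_comm
          have h4 : ((es1 ++ es2) ++ [e']).Perm (es1 ++ e' :: es2) := by
            rw [List.append_assoc]
            exact List.Perm.append_left es1 h3
          exact h1.trans h4
        have hpair2 : ((es1 ++ e' :: es2).map (fun e => e.2.1)).Pairwise (· < ·) := by
          have : (es1 ++ e' :: es2).map (fun e => e.2.1)
              = (es1 ++ (v, s, i) :: es2).map (fun e => e.2.1) := by
            simp [he']
          rw [this]; exact hpair
        have hinv2 : ∀ e ∈ es1 ++ e' :: es2, pvInv values e := by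
          intro e he
          rcases List.mem_append.mp he with he1 | he1
          · exact hinv e (List.mem_append_left _ he1)
          · rcases List.mem_cons.mp he1 with rfl | he2
            · exact hinv'
            · exact hinv e (List.mem_append_right _ (List.mem_cons_of_mem _ he2))
        have hf2 : (((es1 ++ e' :: es2).map (fun e => pvSeq values e)).map List.length).sum ≤ fuel := by
          have hx : ((es1 ++ (v, s, i) :: es2).map (fun e => pvSeq values e)).map List.length
              = (es1.map (fun e => pvSeq values e)).map List.length
                ++ (t.length + 1) :: (es2.map (fun e => pvSeq values e)).map List.length := by
            simp [hseq]
          have hy : ((es1 ++ e' :: es2).map (fun e => pvSeq values e)).map List.length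
              = (es1.map (fun e => pvSeq values e)).map List.length
                ++ t.length :: (es2.map (fun e => pvSeq values e)).map List.length := by
            simp [hseq']
          rw [hx] at hf
          rw [hy]
          simp only [List.sum_append, List.sum_cons] at hf ⊢
          omega
        have hmid : (es1 ++ e' :: es2).map (fun e => pvSeq values e)
            = es1.map (fun e => pvSeq values e) ++ (if t = [] then [] else [t])
              ++ es2.map (fun e => pvSeq values e) := by
          rw [if_neg htne]
          simp [hseq']
        rw [← hmid]
        exact ih (rest ++ [e']) (es1 ++ e' :: es2) (total + v * day) (day + 1)
          hperm2 hpair2 hinv2 hf2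
      · rw [if_neg hipos]
        have hieq : i.toNat = 0 := by omega
        have htnil : t = [] := by rw [ht, hieq]; simp
        have hsub : List.Sublist ((es1 ++ es2).map (fun e => e.2.1))
            ((es1 ++ (v, s, i) :: es2).map (fun e => e.2.1)) :=
          ((List.Sublist.refl es1).append (List.sublist_cons_self _ _)).map _
        have hpair2 : ((es1 ++ es2).map (fun e => e.2.1)).Pairwise (· < ·) :=
          hpair.sublist hsub
        have hinv2 : ∀ e ∈ es1 ++ es2, pvInv values e := by
          intro e he
          rcases List.mem_append.mp he with he1 | he1
          · exact hinv e (List.mem_append_left _ he1)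
          · exact hinv e (List.mem_append_right _ (List.mem_cons_of_mem _ he1))
        have hf2 : (((es1 ++ es2).map (fun e => pvSeq values e)).map List.length).sum ≤ fuel := by
          have hx : ((es1 ++ (v, s, i) :: es2).map (fun e => pvSeq values e)).map List.length
              = (es1.map (fun e => pvSeq values e)).map List.length
                ++ (t.length + 1) :: (es2.map (fun e => pvSeq values e)).map List.length := by
            simp [hseq]
          have hy : ((es1 ++ es2).map (fun e => pvSeq values e)).map List.length
              = (es1.map (fun e => pvSeq values e)).map List.length
                ++ (es2.map (fun e => pvSeq values e)).map List.length := by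
            simp
          rw [hx] at hf
          rw [hy]
          simp only [List.sum_append, List.sum_cons] at hf ⊢
          omega
        have hmid : (es1 ++ es2).map (fun e => pvSeq values e)
            = es1.map (fun e => pvSeq values e) ++ (if t = [] then [] else [t])
              ++ es2.map (fun e => pvSeq values e) := by
          rw [if_pos htnil]
          simp
        rw [← hmid]
        exact ih rest (es1 ++ es2) (total + v * day) (day + 1) hrest hpair2 hinv2 hf2

theorem pvHeapInit_eq (values : List (List Int)) (m : Int) :
    pvHeapInit values m
      = (List.range values.length).map (fun (k : Nat) => (pvGetV values (k : Int) (m - 1), (k : Int), m - 1)) := by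
  unfold pvHeapInit
  rw [PySem.List.pyRange_one, List.foldl_map, PySem.List.foldl_append_singleton_eq_map]
  have h1 : ((values.length : Int) - 0).toNat = values.length := by omega
  rw [h1, List.nil_append]
  apply List.map_congr_left
  intro k _
  simp

/-- B's comprehension `[shop[j] for j in range(n-1, -1, -1)]` is the reversed length-`n`
prefix of the row, when the row is long enough. -/
theorem pvRevPrefix_eq (row : List Int) (n : Nat) (h : n ≤ row.length) :
    (PySem.List.pyRange ((n : Int) - 1) (-1) (-1)).map (fun j => PySem.List.pyGetD row j 0)
      = (row.take n).reverse := by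
  rw [PySem.List.pyRange_neg_one_eq_reverse]
  have h1 : (-1 : Int) + 1 = 0 := by omega
  have h2 : ((n : Int) - 1) + 1 = (n : Int) := by omega
  rw [h1, h2, List.map_reverse]
  congr 1
  rw [PySem.List.pyRange_one]
  apply List.ext_getElem
  · simp; omega
  · intro k hk1 hk2
    simp only [List.getElem_map, List.getElem_range, List.getElem_take]
    have hk : k < n := by
      have h' := hk2
      simp [List.length_take] at h'
      omega
    rw [PySem.List.pyGetD_eq_getElem row 0 (by omega) (by omega)]
    congr 1
    omega

-- ===== VERDICT (by name: the statement is the Claim_ definition above) =====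
theorem maxSpending_spec : Claim_equal_maxSpending := by
  unfold Claim_equal_maxSpending Spec_maxSpending
  intro values hdom hpre
  obtain ⟨hne, hh0, hlen⟩ := hpre
  cases values with
  | nil => exact absurd rfl hne
  | cons r0 vs =>
    simp only [List.headD_cons] at hh0 hlen
    set V : List (List Int) := r0 :: vs with hV
    set n : Nat := r0.length with hn
    have hn1 : 1 ≤ n := by
      cases r0 with
      | nil => exact absurd rfl hh0
      | cons a r => simp [hn]
    have hnum : ((PySem.List.pyGet? V 0).getD []).length = n := by
      rw [hV, PySem.List.pyGet?_zero_cons]; rfl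
    set h0 : List (Int × Int × Int) :=
      (List.range V.length).map
        (fun (k : Nat) => (pvGetV V (k : Int) ((n : Int) - 1), (k : Int), (n : Int) - 1))
      with hh0def
    have hinit : pvHeapInit V (((PySem.List.pyGet? V 0).getD []).length : Int) = h0 := by
      rw [hnum, pvHeapInit_eq]
    have hrowk : ∀ k : Nat, pvRow V (k : Int) = V.getD k [] := by
      intro k; unfold pvRow; rw [Int.toNat_natCast]
    have hrowlen : ∀ k : Nat, k < V.length → n ≤ (V.getD k []).length := by
      intro k hk
      rw [List.getD_eq_getElem V [] hk]
      exact hlen _ (List.getElem_mem hk)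
    have hinv0 : ∀ e ∈ h0, pvInv V e := by
      intro e he
      rw [hh0def] at he
      obtain ⟨k, hk, rfl⟩ := List.mem_map.mp he
      rw [List.mem_range] at hk
      have hrow := hrowk k
      have hlen' := hrowlen k hk
      refine ⟨?_, ?_, ?_, ?_, ?_⟩
      · show (0 : Int) ≤ (k : Int); positivity
      · show ((k : Int)).toNat < V.length; simpa using hk
      · show (0 : Int) ≤ (n : Int) - 1; omega
      · show ((n : Int) - 1).toNat < (pvRow V (k : Int)).length
        rw [hrow]; omega
      · show pvGetV V (k : Int) ((n : Int) - 1) = (pvRow V (k : Int)).getD ((n : Int) - 1).toNat 0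
        exact pvGetV_eq V (k : Int) ((n : Int) - 1) (by positivity) (by simpa using hk)
          (by omega) (by rw [hrow]; omega)
    have hpair0 : (h0.map (fun e => e.2.1)).Pairwise (· < ·) := by
      rw [hh0def, List.map_map]
      have hcomp : ((fun e : Int × Int × Int => e.2.1) ∘
          (fun (k : Nat) => (pvGetV V (k : Int) ((n : Int) - 1), (k : Int), (n : Int) - 1)))
          = fun (k : Nat) => (k : Int) := rfl
      rw [hcomp]
      exact List.Pairwise.map _ (fun a b hab => by exact_mod_cast hab) List.pairwise_lt_range
    have hseqmap : h0.map (fun e => pvSeq V e) = V.map (fun shop => (shop.take n).reverse) := by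
      rw [hh0def, List.map_map]
      apply List.ext_getElem
      · simp
      · intro j h1 h2
        simp only [List.getElem_map, List.getElem_range, Function.comp_apply]
        show ((pvRow V ((j : Int))).take ((((n : Int) - 1)).toNat + 1)).reverse
          = ((V[j]'(by simpa using h2)).take n).reverse
        rw [hrowk j]
        have hnn : ((n : Int) - 1).toNat + 1 = n := by omega
        rw [hnn, List.getD_eq_getElem V [] (by simpa using h2)]
    have hfuel : ((h0.map (fun e => pvSeq V e)).map List.length).sum
        ≤ (h0.map (fun e => e.2.2.toNat + 1)).sum := by
      rw [List.map_map]
      refine List.sum_le_sum ?_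
      intro e _
      simp only [Function.comp_apply, pvSeq, List.length_reverse, List.length_take]
      omega
    have hmain := pvLoop_merge V ((h0.map (fun e => e.2.2.toNat + 1)).sum) h0 h0 0 1
      (List.Perm.refl _) hpair0 hinv0 hfuel
    have hAside : maxSpending V = pvLoop V ((h0.map (fun e => e.2.2.toNat + 1)).sum) h0 0 1 := by
      show pvLoop V
          (((pvHeapInit V (((PySem.List.pyGet? V 0).getD []).length : Int)).map
            (fun e => e.2.2.toNat + 1)).sum)
          (pvHeapInit V (((PySem.List.pyGet? V 0).getD []).length : Int)) 0 1 = _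
      rw [hinit]
    have hBside : maxSpending_alt V
        = pvWsum (List.foldr pvMerge [] (h0.map (fun e => pvSeq V e))) 0 1 := by
      show pvWsum (V.foldl (fun merged shop =>
          pvMerge merged
            ((PySem.List.pyRange ((((PySem.List.pyGet? V 0).getD []).length : Int) - 1) (-1) (-1)).map
              (fun j => PySem.List.pyGetD shop j 0))) []) 0 1 = _
      rw [hnum]
      have hcong : V.foldl (fun merged shop =>
            pvMerge merged
              ((PySem.List.pyRange ((n : Int) - 1) (-1) (-1)).map
                (fun j => PySem.List.pyGetD shop j 0))) []
          = V.foldl (fun merged shop => pvMerge merged ((shop.take n).reverse)) [] := by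
        apply PySem.List.foldl_congr_mem
        intro acc shop hshop
        rw [pvRevPrefix_eq shop n (hlen shop hshop)]
      rw [hcong]
      have hgen : ∀ (P : List (List Int)) (acc : List Int),
          P.foldl (fun m shop => pvMerge m ((shop.take n).reverse)) acc
            = pvMerge acc (List.foldr pvMerge [] (P.map (fun shop => (shop.take n).reverse))) := by
        intro P
        induction P with
        | nil => intro acc; simp [pvMerge_nil_right]
        | cons r P' ih =>
          intro acc
          simp only [List.foldl_cons, List.map_cons, List.foldr_cons]
          rw [ih, pvMerge_assoc]
      rw [hgen, pvMerge_nil_left, ← hseqmap]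
    rw [hAside, hmain, hBside]
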